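-- pv_equiv track=rewrite | github.com/agiannoul/PdMContextFeedback | evaluation/evaluation.py | _iterate_posible_thresholds
-- ===== SOURCE A (Python) =====
-- import collections
--
-- def _iterate_posible_thresholds(predictions,resolution):
--     predtemp = []
--     if isinstance(predictions[0], collections.abc.Sequence):
--         for predcs in predictions:
--             predtemp.extend(predcs)
--         flatened_scores = [kati for kati in predtemp]
--         predtemp = list(set(predtemp))
--     else:
--         flatened_scores = [kati for kati in predictions]
--         predtemp = list(set(predictions))
--     predtemp.sort()
--     unique = list(set(predtemp))
--     unique.sort()
--     resolution = min(resolution, max(1, len(unique)))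
--     step = int(len(unique) / resolution)
--     return unique,resolution,step,flatened_scores
-- ===== SOURCE B (Python) =====
-- import collections.abc
--
-- def _iterate_posible_thresholds(predictions, resolution):
--     if isinstance(predictions[0], collections.abc.Sequence):
--         flatened_scores = [x for row in predictions for x in row]
--     else:
--         flatened_scores = [x for x in predictions]
--     # build the sorted distinct list incrementally: one pass over the scores,
--     # binary-search insertion keeping `unique` sorted and duplicate-free throughout
--     unique = []
--     for v in flatened_scores:
--         lo, hi = 0, len(unique)
--         while lo < hi:
--             mid = (lo + hi) // 2
--             if unique[mid] < v:
--                 lo = mid + 1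
--             else:
--                 hi = mid
--         if lo == len(unique) or unique[lo] != v:
--             unique.insert(lo, v)
--     resolution = min(resolution, max(1, len(unique)))
--     step = int(len(unique) / resolution)
--     return unique, resolution, step, flatened_scores
-- ===== Notes on version B (the rewrite author's own statement) =====
-- stated objective: alternative
-- what changed: Replaces A's hash-set dedup followed by two sorts with an incremental binary-search insertion: one pass over the flattened scores maintaining a sorted duplicate-free list throughout, so no set() and no sort call at all.
import Mathlib
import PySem

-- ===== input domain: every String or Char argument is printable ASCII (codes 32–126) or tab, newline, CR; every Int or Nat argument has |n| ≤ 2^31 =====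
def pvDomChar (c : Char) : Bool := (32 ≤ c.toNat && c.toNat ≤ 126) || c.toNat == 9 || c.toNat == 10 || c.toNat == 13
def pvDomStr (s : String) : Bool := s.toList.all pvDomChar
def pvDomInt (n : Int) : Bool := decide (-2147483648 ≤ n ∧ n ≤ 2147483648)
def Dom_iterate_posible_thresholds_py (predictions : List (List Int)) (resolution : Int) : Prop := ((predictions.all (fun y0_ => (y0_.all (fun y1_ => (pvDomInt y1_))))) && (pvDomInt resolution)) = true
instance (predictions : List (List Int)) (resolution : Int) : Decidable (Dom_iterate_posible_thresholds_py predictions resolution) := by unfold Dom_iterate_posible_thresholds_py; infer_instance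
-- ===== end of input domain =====

-- B replaces A's set()-dedup-plus-two-sorts by one pass of binary-search insertion into
-- an always-sorted duplicate-free list (objective: alternative); return value only,
-- neither implementation mutates its arguments observably.

-- ===== PORT A =====
-- isinstance(predictions[0], collections.abc.Sequence) is True for every element of a
-- list[list[int]] (each element is a list), so the Sequence branch is always taken;
-- predictions[0] on an empty list raises IndexError (excluded by Pre_).
-- list(set(..)) is ported as PySem.Set.ofList; its (unmodelled hash) order is consumed
-- only by a key-less sort, where order does not matter.
-- int(len(unique)/resolution) is truncation toward zero, exact here since
-- len(unique) < 2^52; ported as Int.tdiv.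
def iterate_posible_thresholds_py (predictions : List (List Int)) (resolution : Int) : List Int × Int × Int × List Int :=
  let predtemp : List Int := predictions.foldl (fun acc predcs => acc ++ predcs) []
  let flatened_scores : List Int := predtemp.map (fun kati => kati)
  let predtemp : List Int := PySem.Set.ofList predtemp
  let predtemp : List Int := PySem.List.sorted predtemp (fun x => x) false
  let unique : List Int := PySem.Set.ofList predtemp
  let unique : List Int := PySem.List.sorted unique (fun x => x) false
  let resolution2 : Int := min resolution (max 1 (unique.length : Int))
  let step : Int := Int.tdiv (unique.length : Int) resolution2
  (unique, resolution2, step, flatened_scores)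

-- ===== PORT B =====
-- the hand-written while-loop 'lo, hi = 0, len(unique); while lo < hi: …', step for step;
-- unique[mid] is in range (lo ≤ mid < hi ≤ len), ported as getD with an unused default
def pvBisect (u : List Int) (v : Int) (lo hi : Nat) : Nat :=
  if _h : lo < hi then
    let mid := (lo + hi) / 2
    if u.getD mid 0 < v then pvBisect u v (mid + 1) hi else pvBisect u v lo mid
  else lo
termination_by hi - lo
decreasing_by all_goals omega

-- body of 'for v in flatened_scores: …' — unique.insert(lo, v) at 0 ≤ lo ≤ len
def pvInsertStep (u : List Int) (v : Int) : List Int :=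
  let lo := pvBisect u v 0 u.length
  if lo = u.length ∨ u.getD lo 0 ≠ v then u.take lo ++ v :: u.drop lo else u

def iterate_posible_thresholds_py_alt (predictions : List (List Int)) (resolution : Int) : List Int × Int × Int × List Int :=
  let flatened_scores : List Int := predictions.flatMap (fun row => row)
  let unique : List Int := flatened_scores.foldl pvInsertStep []
  let resolution2 : Int := min resolution (max 1 (unique.length : Int))
  let step : Int := Int.tdiv (unique.length : Int) resolution2
  (unique, resolution2, step, flatened_scores)

-- ===== PRECONDITION & SPEC =====
-- A raises IndexError on predictions = [] (predictions[0]) and ZeroDivisionError when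
-- resolution = 0 (min(0, max(1,·)) = 0); B raises at exactly the same inputs.
def Pre_iterate_posible_thresholds_py (predictions : List (List Int)) (resolution : Int) : Prop :=
  predictions ≠ [] ∧ resolution ≠ 0
instance (predictions : List (List Int)) (resolution : Int) : Decidable (Pre_iterate_posible_thresholds_py predictions resolution) := by unfold Pre_iterate_posible_thresholds_py; infer_instance
def pvWitness_iterate_posible_thresholds_py : List (List Int) × Int := ([[3, 1], [2, 1]], 2)

def Spec_iterate_posible_thresholds_py (predictions : List (List Int)) (resolution : Int) (out : List Int × Int × Int × List Int) : Prop := out = iterate_posible_thresholds_py_alt predictions resolution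
instance (predictions : List (List Int)) (resolution : Int) (out : List Int × Int × Int × List Int) : Decidable (Spec_iterate_posible_thresholds_py predictions resolution out) := by unfold Spec_iterate_posible_thresholds_py; infer_instance

-- ===== CLAIM (what is proved, stated in full; the proofs are below) =====
def Claim_equal_iterate_posible_thresholds_py : Prop := ∀ (predictions : List (List Int)) (resolution : Int), Dom_iterate_posible_thresholds_py predictions resolution → Pre_iterate_posible_thresholds_py predictions resolution → Spec_iterate_posible_thresholds_py predictions resolution (iterate_posible_thresholds_py predictions resolution)

-- ===== LEMMAS AND PROOFS =====

-- getD is monotone on a ≤-sorted list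
theorem pvGetD_mono (u : List Int) (hs : u.Pairwise (· ≤ ·)) (i j : Nat)
    (hij : i ≤ j) (hj : j < u.length) : u.getD i 0 ≤ u.getD j 0 := by
  rcases eq_or_lt_of_le hij with rfl | hlt
  · exact le_refl _
  · have hi : i < u.length := lt_trans hlt hj
    rw [List.getD_eq_getElem u 0 hi, List.getD_eq_getElem u 0 hj]
    exact List.pairwise_iff_getElem.mp hs i j hi hj hlt

theorem pvBisect_spec_aux (u : List Int) (v : Int) (hs : u.Pairwise (· ≤ ·)) :
    ∀ (n lo hi : Nat), hi - lo ≤ n → lo ≤ hi → hi ≤ u.length →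
      (∀ i, i < lo → u.getD i 0 < v) →
      (∀ i, hi ≤ i → i < u.length → ¬ u.getD i 0 < v) →
      pvBisect u v lo hi ≤ u.length ∧
      (∀ i, i < pvBisect u v lo hi → u.getD i 0 < v) ∧
      (∀ i, pvBisect u v lo hi ≤ i → i < u.length → ¬ u.getD i 0 < v) := by
  intro n
  induction n with
  | zero =>
    intro lo hi hfuel hle hlen hlow hhigh
    have : lo = hi := by omega
    subst this
    rw [pvBisect]
    simp only [lt_irrefl, dif_neg, not_false_eq_true]
    exact ⟨hlen, hlow, hhigh⟩
  | succ n ih =>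
    intro lo hi hfuel hle hlen hlow hhigh
    rw [pvBisect]
    by_cases h : lo < hi
    · simp only [h, dif_pos]
      set mid := (lo + hi) / 2 with hmid
      have hmlo : lo ≤ mid := by omega
      have hmhi : mid < hi := by omega
      by_cases hv : u.getD mid 0 < v
      · simp only [hv, if_pos]
        have hlow' : ∀ i, i < mid + 1 → u.getD i 0 < v := by
          intro i hi'
          exact lt_of_le_of_lt (pvGetD_mono u hs i mid (by omega) (by omega)) hv
        exact ih (mid + 1) hi (by omega) (by omega) hlen hlow' hhigh
      · simp only [hv, if_neg, not_false_eq_true]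
        have hhigh' : ∀ i, mid ≤ i → i < u.length → ¬ u.getD i 0 < v := by
          intro i hi1 hi2 hcon
          exact hv (lt_of_le_of_lt (pvGetD_mono u hs mid i hi1 hi2) hcon)
        exact ih lo mid (by omega) hmlo (by omega) hlow hhigh'
    · simp only [h, dif_neg, not_false_eq_true]
      have : lo = hi := by omega
      subst this
      exact ⟨hlen, hlow, hhigh⟩

theorem pvBisect_spec (u : List Int) (v : Int) (hs : u.Pairwise (· ≤ ·)) :
    pvBisect u v 0 u.length ≤ u.length ∧
    (∀ i, i < pvBisect u v 0 u.length → u.getD i 0 < v) ∧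
    (∀ i, pvBisect u v 0 u.length ≤ i → i < u.length → ¬ u.getD i 0 < v) :=
  pvBisect_spec_aux u v hs u.length 0 u.length (by omega) (Nat.zero_le _) (le_refl _)
    (by intro i hi; omega) (by intro i hi1 hi2; omega)

-- one insertion step preserves strict sortedness and adds exactly {v} to the members
theorem pvInsertStep_spec (u : List Int) (v : Int) (hs : u.Pairwise (· < ·)) :
    (pvInsertStep u v).Pairwise (· < ·) ∧
    (∀ x, x ∈ pvInsertStep u v ↔ x = v ∨ x ∈ u) := by
  have hsle : u.Pairwise (· ≤ ·) := hs.imp le_of_lt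
  obtain ⟨hrlen, hlow, hhigh⟩ := pvBisect_spec u v hsle
  set r := pvBisect u v 0 u.length with hr
  unfold pvInsertStep
  rw [← hr]
  by_cases hc : r = u.length ∨ u.getD r 0 ≠ v
  · simp only [hc, if_pos]
    -- all elements of take r are < v, all elements of drop r are > v
    have htake : ∀ x ∈ u.take r, x < v := by
      intro x hx
      obtain ⟨i, hi, hxe⟩ := List.mem_take_iff_getElem.mp hx
      have hil : i < u.length := (lt_min_iff.mp hi).2
      have := hlow i (lt_min_iff.mp hi).1
      rwa [List.getD_eq_getElem u 0 hil, hxe] at this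
    have hdrop : ∀ x ∈ u.drop r, v < x := by
      intro x hx
      obtain ⟨i, hi, hxe⟩ := List.mem_drop_iff_getElem.mp hx
      have hge : ¬ u.getD (r + i) 0 < v := hhigh (r + i) (by omega) (by omega)
      rw [List.getD_eq_getElem u 0 (by omega)] at hge
      have hvle : v ≤ u[r + i] := not_lt.mp hge
      rcases eq_or_lt_of_le hvle with heq | hlt
      · -- u[r+i] = v: then i ≠ 0 would contradict strictness with u[r] ≥ v … show i = 0 impossible
        exfalso
        rcases hc with hc | hc
        · omega
        · -- u[r] ≠ v; if i = 0 contradiction, if i > 0 then u[r] < u[r+i] = v contradicts hhigh at r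
          have hrlt : r < u.length := by omega
          by_cases hi0 : i = 0
          · subst hi0
            rw [List.getD_eq_getElem u 0 hrlt] at hc
            simp only [Nat.add_zero] at heq
            exact hc heq.symm
          · have : u[r] < u[r + i] := List.pairwise_iff_getElem.mp hs r (r + i) hrlt (by omega) (by omega)
            have hgr : ¬ u.getD r 0 < v := hhigh r (le_refl _) hrlt
            rw [List.getD_eq_getElem u 0 hrlt] at hgr
            omega
      · exact hxe ▸ hlt
    constructor
    · -- pairwise < of take r ++ v :: drop r
      rw [List.pairwise_append]
      refine ⟨List.Pairwise.take hs, ?_, ?_⟩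
      · rw [List.pairwise_cons]
        refine ⟨hdrop, List.Pairwise.drop hs⟩
      · intro a ha b hb
        rcases List.mem_cons.mp hb with rfl | hb'
        · exact htake a ha
        · exact lt_trans (htake a ha) (hdrop b hb')
    · intro x
      constructor
      · intro hx
        rcases List.mem_append.mp hx with h1 | h2
        · exact Or.inr (List.mem_of_mem_take h1)
        · rcases List.mem_cons.mp h2 with rfl | h3
          · exact Or.inl rfl
          · exact Or.inr (List.mem_of_mem_drop h3)
      · rintro (rfl | hx)
        · exact List.mem_append.mpr (Or.inr (List.mem_cons_self))
        · rcases List.mem_append.mp ((List.take_append_drop r u).symm ▸ hx) with h1 | h2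
          · exact List.mem_append.mpr (Or.inl h1)
          · exact List.mem_append.mpr (Or.inr (List.mem_cons_of_mem _ h2))
  · simp only [hc, if_neg, not_false_eq_true]
    push Not at hc
    obtain ⟨hrne, hrv⟩ := hc
    have hrlt : r < u.length := by omega
    refine ⟨hs, fun x => ⟨fun hx => Or.inr hx, ?_⟩⟩
    rintro (rfl | hx)
    · rw [List.getD_eq_getElem u 0 hrlt] at hrv
      exact hrv ▸ List.getElem_mem hrlt
    · exact hx

-- folding pvInsertStep over any list from a sorted nodup accumulator
theorem pvFold_spec (l : List Int) : ∀ (u : List Int), u.Pairwise (· < ·) →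
    (l.foldl pvInsertStep u).Pairwise (· < ·) ∧
    (∀ x, x ∈ l.foldl pvInsertStep u ↔ x ∈ u ∨ x ∈ l) := by
  induction l with
  | nil => intro u hu; exact ⟨hu, by simp⟩
  | cons v t ih =>
    intro u hu
    obtain ⟨hp, hm⟩ := pvInsertStep_spec u v hu
    obtain ⟨hp', hm'⟩ := ih (pvInsertStep u v) hp
    refine ⟨hp', ?_⟩
    intro x
    rw [List.foldl_cons, hm' x, hm x]
    simp [List.mem_cons]
    tauto

theorem pvFlatEq (predictions : List (List Int)) :
    predictions.foldl (fun acc predcs => acc ++ predcs) [] = predictions.flatMap (fun row => row) := by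
  have gen : ∀ (l : List (List Int)) (acc : List Int),
      l.foldl (fun acc predcs => acc ++ predcs) acc = acc ++ l.flatMap (fun row => row) := by
    intro l
    induction l with
    | nil => intro acc; simp
    | cons v t ih => intro acc; simp [ih, List.append_assoc]
  simpa using gen predictions []

-- A's doubly-deduped doubly-sorted unique equals B's insertion-built list
theorem pvUniqueEq (flat : List Int) :
    PySem.List.sorted (PySem.Set.ofList (PySem.List.sorted (PySem.Set.ofList flat) (fun x => x) false)) (fun x => x) false
      = flat.foldl pvInsertStep [] := by
  set s1 : List Int := PySem.List.sorted (PySem.Set.ofList flat) (fun x => x) false with hs1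
  have hlt1 : s1.Pairwise (· < ·) := PySem.List.sorted_ofList_pairwise_lt flat
  have hnd1 : s1.Nodup := hlt1.imp (fun h => ne_of_lt h)
  have hstep : PySem.Set.ofList s1 = s1 := PySem.Set.ofList_eq_self_of_nodup s1 hnd1
  have hsame : PySem.List.sorted s1 (fun x => x) false = s1 :=
    PySem.List.sorted_eq_self_of_pairwise (xs := s1) (key := fun x => x)
      (hlt1.imp (fun h => le_of_lt h))
  rw [hstep, hsame, hs1]
  -- now: sorted (ofList flat) = foldl pvInsertStep [] flat
  obtain ⟨hbp, hbm⟩ := pvFold_spec flat [] (List.Pairwise.nil)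
  set ys : List Int := flat.foldl pvInsertStep [] with hys
  have hmem : ∀ x, x ∈ ys ↔ x ∈ PySem.Set.ofList flat := by
    intro x
    rw [hbm x, PySem.Set.mem_ofList]
    simp
  have hperm : ys.Perm (PySem.Set.ofList flat) := by
    refine List.perm_of_nodup_nodup_toFinset_eq
      (hbp.imp (fun h => ne_of_lt h)) (PySem.Set.nodup_ofList flat) ?_
    ext x
    simp only [List.mem_toFinset]
    exact hmem x
  exact PySem.List.sorted_eq_of_perm_of_pairwise_lt
    (xs := PySem.Set.ofList flat) (ys := ys) (key := fun x => x) hperm hbp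

-- ===== VERDICT (by name: the statement is the Claim_ definition above) =====
theorem iterate_posible_thresholds_py_spec : Claim_equal_iterate_posible_thresholds_py := by
  intro predictions resolution _ _
  unfold Spec_iterate_posible_thresholds_py
  unfold iterate_posible_thresholds_py iterate_posible_thresholds_py_alt
  simp only [pvFlatEq, List.map_id']
  rw [pvUniqueEq]
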